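-- pv_equiv track=rewrite | github.com/AdamLBS/COMP8760-Computer-Security | Class 1/exercise4/test.py | is_valid_pattern
-- ===== SOURCE A (Python) =====
-- invalid_swipes = {
--     ("a", "c"): "b", ("a", "i"): "e", ("a", "g"): "d",
--     ("b", "h"): "e", ("c", "g"): "e", ("c", "i"): "f",
--     ("d", "f"): "e", ("g", "i"): "h",
--     # Add reversed rules for symmetry
--     ("c", "a"): "b", ("i", "a"): "e", ("g", "a"): "d",
--     ("h", "b"): "e", ("g", "c"): "e", ("i", "c"): "f",
--     ("f", "d"): "e", ("i", "g"): "h",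
-- }
--
-- def is_valid_pattern(pattern):
--     visited = set()
--     for i in range(len(pattern) - 1):
--         start, end = pattern[i], pattern[i + 1]
--         if (start, end) in invalid_swipes or (end, start) in invalid_swipes:
--             middle = invalid_swipes.get((start, end), invalid_swipes.get((end, start)))
--             if middle not in visited:
--                 return False
--         visited.add(start)
--     visited.add(pattern[-1])
--     return True
-- ===== SOURCE B (Python) =====
-- invalid_swipes = {
--     ("a", "c"): "b", ("a", "i"): "e", ("a", "g"): "d",
--     ("b", "h"): "e", ("c", "g"): "e", ("c", "i"): "f",
--     ("d", "f"): "e", ("g", "i"): "h",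
--     # Add reversed rules for symmetry
--     ("c", "a"): "b", ("i", "a"): "e", ("g", "a"): "d",
--     ("h", "b"): "e", ("g", "c"): "e", ("i", "c"): "f",
--     ("f", "d"): "e", ("i", "g"): "h",
-- }
--
-- # the 8 underlying rules: jumping over middle m between x and y (either direction) is forbidden
-- _RULES = [("a", "c", "b"), ("a", "i", "e"), ("a", "g", "d"), ("b", "h", "e"),
--           ("c", "g", "e"), ("c", "i", "f"), ("d", "f", "e"), ("g", "i", "h")]
--
-- def is_valid_pattern(pattern):
--     n = len(pattern)
--     # first-occurrence index of every dot (one preliminary pass)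
--     first = {}
--     for i, d in enumerate(pattern):
--         first.setdefault(d, i)
--     # rule-major check: a rule is violated iff the EARLIEST adjacent occurrence of
--     # its pair {x, y} comes no later than the first occurrence of its middle m
--     # (any later occurrence is then covered, since m has already been visited).
--     for x, y, m in _RULES:
--         earliest = None
--         for i in range(n - 1):
--             if {pattern[i], pattern[i + 1]} == {x, y}:
--                 earliest = i
--                 break
--         if earliest is not None and first.get(m, n) >= earliest:
--             return False
--     return True
-- ===== Notes on version B (the rewrite author's own statement) =====
-- stated objective: alternative
-- what changed: A makes one pattern-major pass over consecutive pairs while mutating a visited set; B is rule-major: after a preliminary first-occurrence pass it loops over the 8 forbidden rules, finds each rule's earliest adjacent occurrence of its dot pair and compares that position with the first-occurrence index of the rule's middle dot.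
import Mathlib
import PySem

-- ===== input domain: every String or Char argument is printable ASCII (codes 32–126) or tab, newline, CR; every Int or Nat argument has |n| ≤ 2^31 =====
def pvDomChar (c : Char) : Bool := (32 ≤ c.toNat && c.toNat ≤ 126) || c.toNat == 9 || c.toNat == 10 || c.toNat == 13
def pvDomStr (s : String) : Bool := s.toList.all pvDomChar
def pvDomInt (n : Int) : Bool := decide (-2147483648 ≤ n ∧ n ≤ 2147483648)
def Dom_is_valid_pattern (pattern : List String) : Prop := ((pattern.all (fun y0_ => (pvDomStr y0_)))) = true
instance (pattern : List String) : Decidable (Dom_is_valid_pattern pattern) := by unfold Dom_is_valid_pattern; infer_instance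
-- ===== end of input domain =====

-- B replaces A's pattern-major pass with a mutated visited set by a rule-major check:
-- a preliminary first-occurrence pass, then a loop over the 8 forbidden rules comparing
-- each rule's earliest adjacent pair occurrence with its middle's first occurrence
-- (objective: alternative).

-- ===== PORT A =====
-- the module constant invalid_swipes (shared by both versions, as in the Python module)
def invalidSwipes : PySem.Dict (String × String) String :=
  PySem.Dict.ofList [
    (("a", "c"), "b"), (("a", "i"), "e"), (("a", "g"), "d"),
    (("b", "h"), "e"), (("c", "g"), "e"), (("c", "i"), "f"),
    (("d", "f"), "e"), (("g", "i"), "h"),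
    (("c", "a"), "b"), (("i", "a"), "e"), (("g", "a"), "d"),
    (("h", "b"), "e"), (("g", "c"), "e"), (("i", "c"), "f"),
    (("f", "d"), "e"), (("i", "g"), "h")]

-- the 'for i in range(len(pattern) - 1)' loop of A, with its mutable visited set
def aGo (pattern : List String) (i : Nat) (visited : PySem.Set String) : Bool :=
  if _h : i < pattern.length - 1 then
    let start := pattern.getD i ""
    let e := pattern.getD (i + 1) ""
    if invalidSwipes.contains (start, e) || invalidSwipes.contains (e, start) then
      -- middle = invalid_swipes.get((start, end), invalid_swipes.get((end, start)))
      let middle : Option String := (invalidSwipes.get? (start, e)).or (invalidSwipes.get? (e, start))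
      if !(match middle with | some m => PySem.Set.contains visited m | none => false) then
        false
      else aGo pattern (i + 1) (PySem.Set.add visited start)
    else aGo pattern (i + 1) (PySem.Set.add visited start)
  else
    -- visited.add(pattern[-1]); return True  — pattern[-1] raises IndexError on []
    match PySem.List.pyGet? pattern (-1) with
    | some _ => true
    | none => false    -- unreachable under Pre_ (A raises here)
termination_by pattern.length - 1 - i

def is_valid_pattern (pattern : List String) : Bool :=
  aGo pattern 0 PySem.Set.empty

-- ===== PORT B =====
-- the module constant _RULES of Source B
def rulesList : List (String × String × String) :=
  [("a", "c", "b"), ("a", "i", "e"), ("a", "g", "d"), ("b", "h", "e"),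
   ("c", "g", "e"), ("c", "i", "f"), ("d", "f", "e"), ("g", "i", "h")]

-- preliminary pass: first.setdefault(d, i) over enumerate(pattern)
def buildFirst (pattern : List String) : PySem.Dict String Int :=
  (PySem.List.enumerate pattern).foldl (fun d p => d.setdefault p.2 p.1) PySem.Dict.empty

-- {pattern[i], pattern[i+1]} == {x, y}; exact because x ≠ y in every rule of _RULES,
-- so the two-element set equality is exactly this either-order test
def pairMatch (s t x y : String) : Bool :=
  (s == x && t == y) || (s == y && t == x)

-- the inner 'for i in range(n-1): … break' search for the earliest adjacent pair
def earliestPair (pattern : List String) (x y : String) (i : Nat) : Option Nat :=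
  if _h : i < pattern.length - 1 then
    if pairMatch (pattern.getD i "") (pattern.getD (i + 1) "") x y then some i
    else earliestPair pattern x y (i + 1)
  else none
termination_by pattern.length - 1 - i

-- the rule-major loop 'for x, y, m in _RULES'
def checkRules (pattern : List String) (first : PySem.Dict String Int) :
    List (String × String × String) → Bool
  | [] => true
  | (x, y, m) :: rs =>
    match earliestPair pattern x y 0 with
    | some e =>
        if first.getD m (pattern.length : Int) ≥ (e : Int) then false
        else checkRules pattern first rs
    | none => checkRules pattern first rs

def is_valid_pattern_alt (pattern : List String) : Bool :=
  checkRules pattern (buildFirst pattern) rulesList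

-- ===== PRECONDITION & SPEC =====
-- Pre_ excludes only the empty pattern, on which A raises IndexError (pattern[-1]).
def Pre_is_valid_pattern (pattern : List String) : Prop := pattern ≠ []
instance (pattern : List String) : Decidable (Pre_is_valid_pattern pattern) := by unfold Pre_is_valid_pattern; infer_instance
def pvWitness_is_valid_pattern : List String := ["a", "b", "c"]

def Spec_is_valid_pattern (pattern : List String) (out : Bool) : Prop := out = is_valid_pattern_alt pattern
instance (pattern : List String) (out : Bool) : Decidable (Spec_is_valid_pattern pattern out) := by unfold Spec_is_valid_pattern; infer_instance

-- ===== CLAIM (what is proved, stated in full; the proofs are below) =====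
def Claim_equal_is_valid_pattern : Prop := ∀ (pattern : List String), Dom_is_valid_pattern pattern → Pre_is_valid_pattern pattern → Spec_is_valid_pattern pattern (is_valid_pattern pattern)

-- ===== LEMMAS AND PROOFS =====

-- the forbidden middle of an adjacent pair, as both ports compute it
def mid (s t : String) : Option String :=
  (invalidSwipes.get? (s, t)).or (invalidSwipes.get? (t, s))

-- each rule's pair has that rule's middle, in both orders (finite check)
theorem mid_of_rule (x y m s t : String) (hr : (x, y, m) ∈ rulesList)
    (hp : pairMatch s t x y = true) : mid s t = some m := by
  simp only [pairMatch, Bool.or_eq_true, Bool.and_eq_true, beq_iff_eq] at hp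
  rcases hp with ⟨hs, ht⟩ | ⟨hs, ht⟩ <;> subst hs <;> subst ht <;>
    fin_cases hr <;> decide

-- conversely every table hit comes from a rule whose pair matches
theorem rule_of_mid (s t m : String) (h : mid s t = some m) :
    ∃ x y, (x, y, m) ∈ rulesList ∧ pairMatch s t x y = true := by
  have hnd : invalidSwipes.keys.Nodup := by decide
  have hitems : invalidSwipes.items =
      [(("a", "c"), "b"), (("a", "i"), "e"), (("a", "g"), "d"),
       (("b", "h"), "e"), (("c", "g"), "e"), (("c", "i"), "f"),
       (("d", "f"), "e"), (("g", "i"), "h"),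
       (("c", "a"), "b"), (("i", "a"), "e"), (("g", "a"), "d"),
       (("h", "b"), "e"), (("g", "c"), "e"), (("i", "c"), "f"),
       (("f", "d"), "e"), (("i", "g"), "h")] := by decide
  unfold mid at h
  have hmem : ((s, t), m) ∈ invalidSwipes.items ∨ ((t, s), m) ∈ invalidSwipes.items := by
    cases h1 : invalidSwipes.get? (s, t) with
    | some v =>
      rw [h1, Option.some_or] at h
      injection h with hv
      subst hv
      exact Or.inl (PySem.Dict.mem_items_of_get?_eq_some _ h1)
    | none =>
      rw [h1] at h
      simp only [Option.none_or] at h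
      exact Or.inr (PySem.Dict.mem_items_of_get?_eq_some _ h)
  rw [hitems] at hmem
  simp only [List.mem_cons, List.not_mem_nil, or_false, Prod.mk.injEq] at hmem
  rcases hmem with hc | hc <;>
    rcases hc with ⟨⟨h1,h2⟩,h3⟩|⟨⟨h1,h2⟩,h3⟩|⟨⟨h1,h2⟩,h3⟩|⟨⟨h1,h2⟩,h3⟩|⟨⟨h1,h2⟩,h3⟩|⟨⟨h1,h2⟩,h3⟩|⟨⟨h1,h2⟩,h3⟩|⟨⟨h1,h2⟩,h3⟩|⟨⟨h1,h2⟩,h3⟩|⟨⟨h1,h2⟩,h3⟩|⟨⟨h1,h2⟩,h3⟩|⟨⟨h1,h2⟩,h3⟩|⟨⟨h1,h2⟩,h3⟩|⟨⟨h1,h2⟩,h3⟩|⟨⟨h1,h2⟩,h3⟩|⟨⟨h1,h2⟩,h3⟩ <;>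
    subst h1 <;> subst h2 <;> subst h3 <;>
    first
      | exact ⟨"a", "c", by decide, by decide⟩
      | exact ⟨"a", "i", by decide, by decide⟩
      | exact ⟨"a", "g", by decide, by decide⟩
      | exact ⟨"b", "h", by decide, by decide⟩
      | exact ⟨"c", "g", by decide, by decide⟩
      | exact ⟨"c", "i", by decide, by decide⟩
      | exact ⟨"d", "f", by decide, by decide⟩
      | exact ⟨"g", "i", by decide, by decide⟩

-- what B's preliminary pass computes: get? is the first-occurrence index, offset by the enumerate start
theorem buildFirst_fold (p : List String) (s : Int) (d0 : PySem.Dict String Int) (d : String) :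
    ((PySem.List.enumerate p s).foldl (fun acc q => acc.setdefault q.2 q.1) d0).get? d =
    if d0.contains d then d0.get? d
    else if d ∈ p then some (s + (List.idxOf d p : Int)) else none := by
  induction p generalizing s d0 with
  | nil =>
    by_cases hd : d0.contains d = true
    · simp [PySem.List.enumerate_nil, hd]
    · rw [PySem.Dict.contains_eq_isSome_get?] at hd
      simp only [PySem.List.enumerate_nil, List.foldl_nil, List.not_mem_nil, if_false,
        PySem.Dict.contains_eq_isSome_get?]
      rw [if_neg hd]
      exact Option.not_isSome_iff_eq_none.mp (by simpa using hd)
  | cons x xs ih =>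
    rw [PySem.List.enumerate_cons]
    simp only [List.foldl_cons]
    by_cases hx : d0.contains x = true
    · rw [PySem.Dict.setdefault_of_contains _ _ hx, ih]
      by_cases hd : d0.contains d = true
      · simp [hd]
      · have hxd : d ≠ x := fun h => hd (h ▸ hx)
        have hbeq : (x == d) = false := by simp only [beq_eq_false_iff_ne]; exact fun h => hxd (Eq.symm h)
        simp only [hd, Bool.false_eq_true, if_false, List.mem_cons, List.idxOf_cons, hbeq,
          cond_false, or_iff_right hxd]
        by_cases hm : d ∈ xs
        · simp only [hm, if_pos, Option.some.injEq]
          push_cast; ring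
        · simp [hm]
    · rw [PySem.Dict.setdefault_of_not_contains _ _ (by simpa using hx), ih]
      by_cases hdx : d = x
      · subst hdx
        have h1 : (d0.insert d s).contains d = true := by
          simp [PySem.Dict.contains_eq_isSome_get?]
        have h2 : (d0.insert d s).get? d = some s := by
          simp [PySem.Dict.get?_insert d0 d d s]
        rw [if_pos h1, h2, if_neg (by simp [hx]), if_pos (List.mem_cons_self)]
        simp
      · have hbeq : (x == d) = false := by simp only [beq_eq_false_iff_ne]; exact fun h => hdx (Eq.symm h)
        have h1 : (d0.insert x s).contains d = d0.contains d := by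
          simp [PySem.Dict.contains_eq_isSome_get?, PySem.Dict.get?_insert, hdx]
        have h2 : (d0.insert x s).get? d = d0.get? d := by
          simp [PySem.Dict.get?_insert, hdx]
        rw [h1, h2]
        by_cases hd : d0.contains d = true
        · simp [hd]
        · simp only [hd, Bool.false_eq_true, if_false, List.mem_cons, List.idxOf_cons, hbeq,
            cond_false, or_iff_right hdx]
          by_cases hm : d ∈ xs
          · simp only [hm, if_pos, Option.some.injEq]
            push_cast; ring
          · simp [hm]

-- the first-occurrence map read with default len, compared with i, is membership in take i
theorem getD_buildFirst_lt (p : List String) (d : String) (i : Nat) (hi : i ≤ p.length) :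
    ((buildFirst p).getD d (p.length : Int) < (i : Int)) ↔ d ∈ p.take i := by
  have h := buildFirst_fold p 0 PySem.Dict.empty d
  have hemp : (PySem.Dict.empty : PySem.Dict String Int).contains d = false := by
    simp [PySem.Dict.empty, PySem.Dict.contains]
  rw [hemp] at h
  simp only [Bool.false_eq_true, if_false, zero_add] at h
  unfold buildFirst
  rw [PySem.Dict.getD_eq_get?_getD, h]
  by_cases hm : d ∈ p
  · simp only [hm, if_pos, Option.getD_some]
    constructor
    · intro hlt
      exact (List.mem_take_iff_idxOf_lt (by simpa using hm)).mpr (by exact_mod_cast hlt)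
    · intro ht
      exact_mod_cast (List.mem_take_iff_idxOf_lt (by simpa using hm)).mp ht
  · simp only [hm, Option.getD_none, if_false]
    constructor
    · intro hlt; omega
    · intro ht; exact absurd (List.mem_of_mem_take ht) hm

theorem set_contains_take (p : List String) (i : Nat) (m : String) :
    PySem.Set.contains (PySem.Set.ofList (p.take i)) m = decide (m ∈ p.take i) := by
  by_cases hm : m ∈ p.take i
  · have hc := (PySem.Set.contains_iff _ _).mpr ((PySem.Set.mem_ofList _ _).mpr hm)
    rw [hc, decide_eq_true hm]
  · simp only [hm, decide_false]
    by_contra hc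
    simp only [Bool.not_eq_false] at hc
    exact hm ((PySem.Set.mem_ofList _ _).mp ((PySem.Set.contains_iff _ _).mp hc))

theorem take_succ_set (p : List String) (i : Nat) (hi : i < p.length) :
    PySem.Set.ofList (p.take (i + 1)) = PySem.Set.add (PySem.Set.ofList (p.take i)) (p.getD i "") := by
  rw [List.take_succ_eq_append_getElem hi]
  have : p[i] = p.getD i "" := by simp [List.getD, hi]
  rw [← this, PySem.Set.ofList_eq_foldl, PySem.Set.ofList_eq_foldl, List.foldl_append]
  rfl

-- the semantic content of A's loop: no adjacent forbidden pair before seeing its middle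
theorem aGo_iff (p : List String) (hne : p ≠ []) (i : Nat) :
    aGo p i (PySem.Set.ofList (p.take i)) = true ↔
    ∀ j, i ≤ j → j < p.length - 1 →
      ∀ m, mid (p.getD j "") (p.getD (j + 1) "") = some m → m ∈ p.take j := by
  by_cases h : i < p.length - 1
  · have hi : i < p.length := by omega
    rw [aGo]
    simp only [h, dif_pos]
    have hcon : (invalidSwipes.contains (p.getD i "", p.getD (i+1) "") ||
         invalidSwipes.contains (p.getD (i+1) "", p.getD i "")) =
        (mid (p.getD i "") (p.getD (i+1) "")).isSome := by
      simp [mid, PySem.Dict.contains_eq_isSome_get?, Option.isSome_or]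
    rw [hcon]
    have hraw : (invalidSwipes.get? (p.getD i "", p.getD (i+1) "")).or
        (invalidSwipes.get? (p.getD (i+1) "", p.getD i "")) =
        mid (p.getD i "") (p.getD (i+1) "") := rfl
    rw [hraw]
    cases hcase : mid (p.getD i "") (p.getD (i+1) "") with
    | none =>
      simp only [Option.isSome_none, Bool.false_eq_true, if_false]
      rw [← take_succ_set p i hi]
      rw [aGo_iff p hne (i + 1)]
      constructor
      · intro hrec j hij hj m hm
        rcases Nat.eq_or_lt_of_le hij with he | hl
        · subst he; rw [hm] at hcase; cases hcase
        · exact hrec j hl hj m hm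
      · intro hall j hij hj m hm
        exact hall j (by omega) hj m hm
    | some m =>
      simp only [Option.isSome_some, if_true, set_contains_take]
      by_cases hmem : m ∈ p.take i
      · simp only [hmem, decide_true, Bool.not_true, Bool.false_eq_true, if_false]
        rw [← take_succ_set p i hi, aGo_iff p hne (i + 1)]
        constructor
        · intro hrec j hij hj m' hm'
          rcases Nat.eq_or_lt_of_le hij with he | hl
          · subst he; rw [hm'] at hcase
            injection hcase with hc; subst hc; exact hmem
          · exact hrec j hl hj m' hm'
        · intro hall j hij hj m' hm'
          exact hall j (by omega) hj m' hm'
      · simp only [hmem, decide_false, Bool.not_false, if_true]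
        constructor
        · intro hfalse; cases hfalse
        · intro hall
          exact absurd (hall i le_rfl h m hcase) hmem
  · rw [aGo]
    simp only [h, dif_neg, not_false_iff]
    have hg : PySem.List.pyGet? p (-1) = p.getLast? := by simp [pysem]
    rw [hg]
    cases hl : p.getLast? with
    | none => exact absurd (List.getLast?_eq_none_iff.mp hl) hne
    | some _ =>
      simp only [true_iff]
      intro j hij hj m hm
      omega
termination_by p.length - 1 - i

-- characterization of the earliest-pair search
theorem earliestPair_some (p : List String) (x y : String) (i e : Nat)
    (h : earliestPair p x y i = some e) :
    i ≤ e ∧ e < p.length - 1 ∧ pairMatch (p.getD e "") (p.getD (e + 1) "") x y = true ∧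
      ∀ j, i ≤ j → j < e → pairMatch (p.getD j "") (p.getD (j + 1) "") x y = false := by
  by_cases hlt : i < p.length - 1
  · rw [earliestPair] at h
    simp only [hlt, dif_pos] at h
    by_cases hp : pairMatch (p.getD i "") (p.getD (i + 1) "") x y = true
    · rw [if_pos hp] at h
      injection h with he; subst he
      exact ⟨le_rfl, hlt, hp, fun j h1 h2 => absurd h2 (by omega)⟩
    · rw [if_neg hp] at h
      obtain ⟨h1, h2, h3, h4⟩ := earliestPair_some p x y (i + 1) e h
      refine ⟨by omega, h2, h3, fun j hij hje => ?_⟩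
      rcases Nat.eq_or_lt_of_le hij with heq | hlt'
      · subst heq; exact Bool.eq_false_iff.mpr hp
      · exact h4 j hlt' hje
  · rw [earliestPair] at h
    simp only [hlt, dif_neg, not_false_iff] at h
    cases h
termination_by p.length - 1 - i

theorem earliestPair_none (p : List String) (x y : String) (i : Nat)
    (h : earliestPair p x y i = none) :
    ∀ j, i ≤ j → j < p.length - 1 → pairMatch (p.getD j "") (p.getD (j + 1) "") x y = false := by
  by_cases hlt : i < p.length - 1
  · rw [earliestPair] at h
    simp only [hlt, dif_pos] at h
    by_cases hp : pairMatch (p.getD i "") (p.getD (i + 1) "") x y = true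
    · rw [if_pos hp] at h; cases h
    · rw [if_neg hp] at h
      intro j hij hj
      rcases Nat.eq_or_lt_of_le hij with heq | hlt'
      · subst heq; exact Bool.eq_false_iff.mpr hp
      · exact earliestPair_none p x y (i + 1) h j hlt' hj
  · intro j hij hj; omega
termination_by p.length - 1 - i

-- the rule-major loop is the conjunction of the per-rule conditions
theorem checkRules_iff (p : List String) (first : PySem.Dict String Int)
    (rs : List (String × String × String)) :
    checkRules p first rs = true ↔
    ∀ r ∈ rs, ∀ e, earliestPair p r.1 r.2.1 0 = some e →
      ¬ (first.getD r.2.2 (p.length : Int) ≥ (e : Int)) := by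
  induction rs with
  | nil => simp [checkRules]
  | cons r rs ih =>
    obtain ⟨x, y, m⟩ := r
    simp only [checkRules]
    cases hc : earliestPair p x y 0 with
    | some e =>
      by_cases hge : first.getD m (p.length : Int) ≥ (e : Int)
      · simp only [hge, if_pos]
        constructor
        · intro hf; cases hf
        · intro hall
          exact absurd hge (hall (x, y, m) List.mem_cons_self e hc)
      · simp only [hge, if_neg, not_false_iff, ih]
        constructor
        · intro hall r hr e' he'
          rcases List.mem_cons.mp hr with heq | hmem
          · subst heq
            simp only at he'
            rw [hc] at he'; injection he' with he''; subst he''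
            exact hge
          · exact hall r hmem e' he'
        · intro hall r hr e' he'
          exact hall r (List.mem_cons_of_mem _ hr) e' he'
    | none =>
      rw [ih]
      constructor
      · intro hall r hr e' he'
        rcases List.mem_cons.mp hr with heq | hmem
        · subst heq; simp only at he'; rw [hc] at he'; cases he'
        · exact hall r hmem e' he'
      · intro hall r hr e' he'
        exact hall r (List.mem_cons_of_mem _ hr) e' he'

theorem mem_take_mono (p : List String) (m : String) (e j : Nat) (hej : e ≤ j)
    (h : m ∈ p.take e) : m ∈ p.take j :=
  (List.take_prefix_take_left hej).subset h

-- the two semantic characterizations coincide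
theorem good_iff_rules (p : List String) :
    (∀ j, 0 ≤ j → j < p.length - 1 →
        ∀ m, mid (p.getD j "") (p.getD (j + 1) "") = some m → m ∈ p.take j) ↔
    (∀ r ∈ rulesList, ∀ e, earliestPair p r.1 r.2.1 0 = some e →
        ¬ ((buildFirst p).getD r.2.2 (p.length : Int) ≥ (e : Int))) := by
  constructor
  · intro hgood r hr e he
    obtain ⟨x, y, m⟩ := r
    simp only at he ⊢
    obtain ⟨_, he2, he3, _⟩ := earliestPair_some p x y 0 e he
    have hmid := mid_of_rule x y m _ _ hr he3
    have hmem := hgood e (Nat.zero_le _) he2 m hmid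
    have := (getD_buildFirst_lt p m e (by omega)).mpr hmem
    omega
  · intro hrules j _ hj m hm
    obtain ⟨x, y, hr, hp⟩ := rule_of_mid _ _ m hm
    cases hc : earliestPair p x y 0 with
    | none =>
      have hf := earliestPair_none p x y 0 hc j (Nat.zero_le _) hj
      rw [hp] at hf; cases hf
    | some e =>
      obtain ⟨_, he2, _, hmin⟩ := earliestPair_some p x y 0 e hc
      have hej : e ≤ j := by
        by_contra hgt
        have hf := hmin j (Nat.zero_le _) (by omega)
        rw [hp] at hf; cases hf
      have hne := hrules (x, y, m) hr e hc
      simp only at hne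
      have hlt : (buildFirst p).getD m (p.length : Int) < (e : Int) := by omega
      exact mem_take_mono p m e j hej ((getD_buildFirst_lt p m e (by omega)).mp hlt)

-- ===== VERDICT (by name: the statement is the Claim_ definition above) =====
theorem is_valid_pattern_spec : Claim_equal_is_valid_pattern := by
  intro pattern _ hpre
  unfold Spec_is_valid_pattern is_valid_pattern is_valid_pattern_alt
  rw [Bool.eq_iff_iff]
  have ha := aGo_iff pattern hpre 0
  rw [List.take_zero] at ha
  have e : PySem.Set.ofList ([] : List String) = PySem.Set.empty := rfl
  rw [e] at ha
  rw [ha, checkRules_iff]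
  exact good_iff_rules pattern
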